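-- pv_equiv track=rewrite | github.com/tntraina/alchemy-night | voting.py | calculate_schulze_winners
-- ===== SOURCE A (Python) =====
-- def calculate_schulze_winners(votes, candidates):
--     if not votes or not candidates:
--         return [], []
--     n = len(candidates)
--     idx = {c: i for i, c in enumerate(candidates)}
--     d = [[0 for _ in range(n)] for _ in range(n)]
--     for ranking in votes:
--         for i in range(len(ranking)):
--             for j in range(i + 1, len(ranking)):
--                 a, b = idx[ranking[i]], idx[ranking[j]]
--                 d[a][b] += 1
--     p = [[0 for _ in range(n)] for _ in range(n)]
--     for i in range(n):
--         for j in range(n):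
--             if i != j and d[i][j] > d[j][i]:
--                 p[i][j] = d[i][j]
--     for i in range(n):
--         for j in range(n):
--             if i == j:
--                 continue
--             for k in range(n):
--                 if i == k or j == k:
--                     continue
--                 potential = min(p[j][i], p[i][k])
--                 if potential > p[j][k]:
--                     p[j][k] = potential
--     winners = []
--     for i in range(n):
--         is_winner = True
--         for j in range(n):
--             if i != j and p[j][i] > p[i][j]:
--                 is_winner = False
--                 break
--         if is_winner:
--             winners.append(candidates[i])
--     return winners, p
-- ===== SOURCE B (Python) =====
-- from collections import Counter
-- from itertools import combinations
--
-- def _widest_row(s, n, w):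
--     # Bellman-Ford-style widest-path relaxation from source s: n rounds of
--     # cap[v] = max(cap[v], max_u min(cap[u], w(u, v))), then pin the diagonal to 0.
--     cap = [w(s, v) for v in range(n)]
--     for _ in range(n):
--         new_cap = []
--         for v in range(n):
--             best = cap[v]
--             for u in range(n):
--                 c = min(cap[u], w(u, v))
--                 if c > best:
--                     best = c
--             new_cap.append(best)
--         cap = new_cap
--     cap[s] = 0
--     return cap
--
-- def calculate_schulze_winners(votes, candidates):
--     if not votes or not candidates:
--         return [], []
--     n = len(candidates)
--     idx = {c: i for i, c in enumerate(candidates)}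
--     cnt = Counter()
--     for ranking in votes:
--         for x, y in combinations(ranking, 2):
--             cnt[(idx[x], idx[y])] += 1
--
--     def w(u, v):
--         return cnt[(u, v)] if u != v and cnt[(u, v)] > cnt[(v, u)] else 0
--
--     p = []
--     for s in range(n):
--         p.append(_widest_row(s, n, w))
--     winners = [c for i, c in enumerate(candidates)
--                if all(p[j][i] <= p[i][j] for j in range(n) if j != i)]
--     return winners, p
-- ===== Notes on version B (the rewrite author's own statement) =====
-- stated objective: alternative
-- what changed: The Floyd-Warshall all-pairs triple loop over intermediate vertices is replaced by a per-source single-source widest-path computation: for each candidate s, a Bellman-Ford-style relaxation (n rounds of cap[v] = max(cap[v], max_u min(cap[u], w(u,v))) over the beat-graph edge weights w(u,v) = d[u][v] if d[u][v] > d[v][u] else 0) yields row p[s] directly, with the diagonal pinned to 0; the pairwise tally is built once with a Counter over itertools.combinations instead of nested index loops mutating a matrix.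
import Mathlib
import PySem

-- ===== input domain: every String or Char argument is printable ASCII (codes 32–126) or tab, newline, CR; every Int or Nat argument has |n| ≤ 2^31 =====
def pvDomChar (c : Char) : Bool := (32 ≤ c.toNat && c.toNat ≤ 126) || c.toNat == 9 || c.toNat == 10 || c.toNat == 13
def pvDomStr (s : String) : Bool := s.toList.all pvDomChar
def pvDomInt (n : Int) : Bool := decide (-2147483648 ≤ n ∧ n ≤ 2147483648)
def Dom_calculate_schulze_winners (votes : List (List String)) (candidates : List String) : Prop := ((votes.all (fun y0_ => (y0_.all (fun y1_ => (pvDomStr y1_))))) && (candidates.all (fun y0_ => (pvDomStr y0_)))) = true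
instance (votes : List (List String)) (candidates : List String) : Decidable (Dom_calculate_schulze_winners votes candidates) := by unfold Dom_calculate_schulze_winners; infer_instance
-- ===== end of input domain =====

-- B replaces A's all-pairs Floyd-Warshall strongest-path triple loop by a per-source
-- Bellman-Ford-style widest-path relaxation over the beat graph (and tallies pairwise
-- preferences with a Counter over combinations); same return value proved on Pre_.

-- shared small helpers: matrix cell read/write (m[i][j] and m[i][j] = v) and the
-- index dict {c: i for i, c in enumerate(candidates)} both Pythons build
def mget (m : List (List Int)) (i j : Nat) : Int := (m.getD i []).getD j 0
def mset (m : List (List Int)) (i j : Nat) (v : Int) : List (List Int) :=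
  m.set i ((m.getD i []).set j v)
def mkIdx (candidates : List String) : PySem.Dict String Nat :=
  (PySem.List.enumerate candidates).foldl (fun d p => d.insert p.2 p.1.toNat) PySem.Dict.empty

-- ===== PORT A =====
-- early-return flag + break of the winner scan: recursion over the j list
def winnerCheckA (p : List (List Int)) (i : Nat) : List Nat → Bool
  | [] => true
  | j :: js => if i ≠ j ∧ mget p j i > mget p i j then false else winnerCheckA p i js

def calculate_schulze_winners (votes : List (List String)) (candidates : List String) : List String × List (List Int) :=
  if votes = [] ∨ candidates = [] then ([], []) else
  let n := candidates.length
  let idx := mkIdx candidates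
  let d := votes.foldl (fun dm ranking =>
    (List.range ranking.length).foldl (fun dm i =>
      (List.range' (i+1) (ranking.length - (i+1))).foldl (fun dm j =>
        let a := idx.getD (ranking.getD i "") 0
        let b := idx.getD (ranking.getD j "") 0
        mset dm a b (mget dm a b + 1)) dm) dm)
    (List.replicate n (List.replicate n 0))
  let p1 := (List.range n).foldl (fun p i =>
    (List.range n).foldl (fun p j =>
      if i ≠ j ∧ mget d i j > mget d j i then mset p i j (mget d i j) else p) p)
    (List.replicate n (List.replicate n 0))
  let p2 := (List.range n).foldl (fun p i =>
    (List.range n).foldl (fun p j =>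
      if i = j then p else
      (List.range n).foldl (fun p k =>
        if i = k ∨ j = k then p else
        let potential := min (mget p j i) (mget p i k)
        if potential > mget p j k then mset p j k potential else p) p) p)
    p1
  let winners := (List.range n).foldl (fun w i =>
    if winnerCheckA p2 i (List.range n) then w ++ [candidates.getD i ""] else w) []
  (winners, p2)

-- ===== PORT B =====
-- itertools.combinations(ranking, 2)
def combos2 : List String → List (String × String)
  | [] => []
  | x :: xs => xs.map (fun y => (x, y)) ++ combos2 xs

-- _widest_row: Bellman-Ford widest-path relaxation from source s, then diagonal pinned to 0
def bfRow (n : Nat) (w : Nat → Nat → Int) (s : Nat) : List Int :=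
  let cap0 := (List.range n).map (fun v => w s v)
  let cap := (List.range n).foldl (fun cap _ =>
    (List.range n).foldl (fun nc v =>
      nc ++ [(List.range n).foldl (fun best u =>
        let c := min (cap.getD u 0) (w u v)
        if c > best then c else best) (cap.getD v 0)]) []) cap0
  cap.set s 0

def calculate_schulze_winners_alt (votes : List (List String)) (candidates : List String) : List String × List (List Int) :=
  if votes = [] ∨ candidates = [] then ([], []) else
  let n := candidates.length
  let idx := mkIdx candidates
  let cnt : PySem.Dict (Nat × Nat) Int := votes.foldl (fun c ranking =>
    (combos2 ranking).foldl (fun c xy =>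
      let key := (idx.getD xy.1 0, idx.getD xy.2 0)
      c.insert key (c.getD key 0 + 1)) c) PySem.Dict.empty
  let w : Nat → Nat → Int := fun u v =>
    if u ≠ v ∧ cnt.getD (u, v) 0 > cnt.getD (v, u) 0 then cnt.getD (u, v) 0 else 0
  let p := (List.range n).foldl (fun p s => p ++ [bfRow n w s]) []
  let winners := ((PySem.List.enumerate candidates).filter (fun ic =>
    (List.range n).all (fun j => j == ic.1.toNat || decide (mget p j ic.1.toNat ≤ mget p ic.1.toNat j)))).map (fun ic => ic.2)
  (winners, p)

-- ===== PRECONDITION & SPEC =====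
-- Pre_ excludes exactly the inputs where Python A raises KeyError: a nonempty election in
-- which some ballot with at least two entries ranks a string that is not in candidates
-- (ballots of length < 2 produce no pairs, so their entries are never looked up; B raises
-- on the same inputs).
def Pre_calculate_schulze_winners (votes : List (List String)) (candidates : List String) : Prop :=
  votes = [] ∨ candidates = [] ∨ ∀ r ∈ votes, 2 ≤ r.length → ∀ x ∈ r, x ∈ candidates
instance (votes : List (List String)) (candidates : List String) : Decidable (Pre_calculate_schulze_winners votes candidates) := by unfold Pre_calculate_schulze_winners; infer_instance

def pvWitness_calculate_schulze_winners : List (List String) × List String :=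
  ([["a", "b", "c"], ["b", "a", "c"], ["a", "c", "b"]], ["a", "b", "c"])

def Spec_calculate_schulze_winners (votes : List (List String)) (candidates : List String) (out : List String × List (List Int)) : Prop := out = calculate_schulze_winners_alt votes candidates
instance (votes : List (List String)) (candidates : List String) (out : List String × List (List Int)) : Decidable (Spec_calculate_schulze_winners votes candidates out) := by unfold Spec_calculate_schulze_winners; infer_instance

-- ===== CLAIM (what is proved, stated in full; the proofs are below) =====
def Claim_equal_calculate_schulze_winners : Prop := ∀ (votes : List (List String)) (candidates : List String), Dom_calculate_schulze_winners votes candidates → Pre_calculate_schulze_winners votes candidates → Spec_calculate_schulze_winners votes candidates (calculate_schulze_winners votes candidates)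

-- ===== LEMMAS AND PROOFS =====

-- matrix shape and zero-diagonal invariants
def Shaped (n : Nat) (m : List (List Int)) : Prop := m.length = n ∧ ∀ r ∈ m, r.length = n
def ZDiag (n : Nat) (m : List (List Int)) : Prop := ∀ a, a < n → mget m a a = 0

theorem shaped_mset {n : Nat} {m : List (List Int)} (h : Shaped n m) (i j : Nat) (v : Int) :
    Shaped n (mset m i j v) := by
  obtain ⟨h1, h2⟩ := h
  refine ⟨by simp [mset, h1], ?_⟩
  intro r hr
  rcases Nat.lt_or_ge i m.length with hi | hi
  · rcases List.mem_or_eq_of_mem_set hr with hr' | rfl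
    · exact h2 r hr'
    · have hrow : m.getD i [] = m[i] := by
        simp [List.getD_eq_getElem?_getD, List.getElem?_eq_getElem hi]
      rw [List.length_set, hrow]
      exact h2 _ (List.getElem_mem hi)
  · rw [mset, List.set_eq_of_length_le hi] at hr
    exact h2 r hr

theorem mget_mset_self {m : List (List Int)} {i j : Nat} (v : Int)
    (hi : i < m.length) (hj : j < (m.getD i []).length) :
    mget (mset m i j v) i j = v := by
  have hj' : j < (m[i]?.getD []).length := by
    simpa [List.getD_eq_getElem?_getD] using hj
  simp [mget, mset, List.getD_eq_getElem?_getD, List.getElem?_set_self hi,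
    List.getElem?_set_self hj']

theorem mget_mset_ne {m : List (List Int)} {i j a b : Nat} (v : Int)
    (h : a ≠ i ∨ b ≠ j) : mget (mset m i j v) a b = mget m a b := by
  rcases h with h | h
  · simp [mget, mset, List.getD_eq_getElem?_getD, List.getElem?_set_ne (Ne.symm h)]
  · rcases eq_or_ne a i with rfl | ha
    · rcases Nat.lt_or_ge a m.length with hi | hi
      · simp [mget, mset, List.getD_eq_getElem?_getD, List.getElem?_set_self hi,
          List.getElem?_set_ne (Ne.symm h)]
      · simp [mget, mset, List.set_eq_of_length_le hi]
    · simp [mget, mset, List.getD_eq_getElem?_getD, List.getElem?_set_ne (Ne.symm ha)]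

theorem shaped_zero (n : Nat) : Shaped n (List.replicate n (List.replicate n 0)) := by
  constructor
  · simp
  · intro r hr; simp_all [List.eq_of_mem_replicate hr]

theorem mget_zero (n a b : Nat) : mget (List.replicate n (List.replicate n 0)) a b = 0 := by
  rcases Nat.lt_or_ge a n with ha | ha
  · rcases Nat.lt_or_ge b n with hb | hb
    · simp [mget, List.getD_eq_getElem?_getD, List.getElem?_replicate_of_lt ha,
        List.getElem?_replicate_of_lt hb]
    · have h0 : (List.replicate n (0:Int))[b]? = none := List.getElem?_eq_none (by simpa using hb)
      simp [mget, List.getD_eq_getElem?_getD, List.getElem?_replicate_of_lt ha, h0]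
  · have h0 : (List.replicate n (List.replicate n (0:Int)))[a]? = none :=
      List.getElem?_eq_none (by simpa using ha)
    simp [mget, List.getD_eq_getElem?_getD, h0]

-- the mapped pair-index stream both tallies run over
def idxv (cs : List String) (x : String) : Nat := (mkIdx cs).getD x 0
def pairKeys (cs : List String) (r : List String) : List (Nat × Nat) :=
  (combos2 r).map (fun xy => (idxv cs xy.1, idxv cs xy.2))
def dinc (m : List (List Int)) (k : Nat × Nat) : List (List Int) :=
  mset m k.1 k.2 (mget m k.1 k.2 + 1)

theorem row_len {n : Nat} {m : List (List Int)} (h : Shaped n m) {i : Nat} (hi : i < n) :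
    (m.getD i []).length = n := by
  obtain ⟨h1, h2⟩ := h
  have hi' : i < m.length := h1 ▸ hi
  have : m.getD i [] = m[i] := by
    simp [List.getD_eq_getElem?_getD, List.getElem?_eq_getElem hi']
  rw [this]; exact h2 _ (List.getElem_mem hi')

theorem foldl_flatMap {α β γ : Type} (g : α → List β) (f : γ → β → γ) :
    ∀ (l : List α) (init : γ),
      (l.flatMap g).foldl f init = l.foldl (fun acc r => (g r).foldl f acc) init := by
  intro l
  induction l with
  | nil => intro init; rfl
  | cons r t ih => intro init; simp only [List.flatMap_cons, List.foldl_append, List.foldl_cons, ih]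

theorem foldl_range'_getD {β : Type} (g : β → String → β) :
    ∀ (l pre : List String) (m : β),
      (List.range' pre.length l.length).foldl (fun m j => g m ((pre ++ l).getD j "")) m
        = l.foldl g m := by
  intro l
  induction l with
  | nil => intro pre m; rfl
  | cons y ys ih =>
    intro pre m
    rw [List.length_cons, List.range'_succ, List.foldl_cons]
    have h0 : (pre ++ y :: ys).getD pre.length "" = y := by
      simp [List.getD_eq_getElem?_getD]
    rw [h0]
    have h1 : pre ++ y :: ys = (pre ++ [y]) ++ ys := by simp
    have h2 : pre.length + 1 = (pre ++ [y]).length := by simp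
    rw [h1, h2, ih ((pre ++ [y])) (g m y)]
    rfl

theorem double_loop_drop {β : Type} (step : β → String → String → β) :
    ∀ (r : List String) (m : β),
      (List.range r.length).foldl
        (fun m i => (r.drop (i+1)).foldl (fun m y => step m (r.getD i "") y) m) m
        = (combos2 r).foldl (fun m xy => step m xy.1 xy.2) m := by
  intro r
  induction r with
  | nil => intro m; rfl
  | cons x xs ih =>
    intro m
    have hr : List.range (x :: xs).length = 0 :: (List.range xs.length).map (·+1) := by
      simpa using List.range_succ_eq_map (n := xs.length)
    rw [hr, List.foldl_cons, List.foldl_map]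
    simp only [List.drop_succ_cons, List.getD_cons_succ, List.getD_cons_zero]
    rw [ih]
    simp [combos2, List.foldl_append, List.foldl_map]

theorem double_loop_eq {β : Type} (step : β → String → String → β) (r : List String) (m : β) :
    (List.range r.length).foldl
      (fun m i => (List.range' (i+1) (r.length - (i+1))).foldl
        (fun m j => step m (r.getD i "") (r.getD j "")) m) m
      = (combos2 r).foldl (fun m xy => step m xy.1 xy.2) m := by
  rw [← double_loop_drop step r m]
  apply PySem.List.foldl_congr_mem
  intro acc i hi
  have hi' : i < r.length := List.mem_range.mp hi
  have hpre : (r.take (i+1)).length = i + 1 := by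
    simp [List.length_take, Nat.min_eq_left hi']
  have hlen : (r.drop (i+1)).length = r.length - (i+1) := by simp
  have happ : r.take (i+1) ++ r.drop (i+1) = r := List.take_append_drop _ _
  have h := foldl_range'_getD (fun m y => step m (r.getD i "") y) (r.drop (i+1)) (r.take (i+1)) acc
  rw [hpre, happ, hlen] at h
  exact h

theorem mget_foldl_dinc (n : Nat) :
    ∀ (L : List (Nat × Nat)) (m : List (List Int)), Shaped n m →
      (∀ k ∈ L, k.1 < n ∧ k.2 < n) →
      Shaped n (L.foldl dinc m) ∧
        ∀ a b, a < n → b < n →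
          mget (L.foldl dinc m) a b = mget m a b + (L.count (a, b) : Int) := by
  intro L
  induction L with
  | nil => intro m hm _; exact ⟨hm, by simp⟩
  | cons k t ih =>
    intro m hm hk
    have hk1 := (hk k (by simp)).1
    have hk2 := (hk k (by simp)).2
    have hm1 : Shaped n (dinc m k) := shaped_mset hm _ _ _
    obtain ⟨hsh, hval⟩ := ih (dinc m k) hm1 (fun x hx => hk x (by simp [hx]))
    refine ⟨hsh, ?_⟩
    intro a b ha hb
    rw [List.foldl_cons, hval a b ha hb]
    rcases eq_or_ne (a, b) k with rfl | hne
    · rw [dinc, mget_mset_self _ (hm.1 ▸ hk1) ((row_len hm hk1).symm ▸ hk2)]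
      simp
      ring
    · have : a ≠ k.1 ∨ b ≠ k.2 := by
        by_contra hcon
        rw [not_or] at hcon
        simp only [not_not] at hcon
        exact hne (Prod.ext hcon.1 hcon.2)
      rw [dinc, mget_mset_ne _ this]
      have hk : k ≠ (a, b) := fun h => hne h.symm
      simp [hk]

theorem values_foldl_insert_mem {l : List (Int × String)} :
    ∀ (d : PySem.Dict String Nat) (w : Nat),
      w ∈ (l.foldl (fun d p => d.insert p.2 p.1.toNat) d).values →
      w ∈ d.values ∨ ∃ p ∈ l, w = p.1.toNat := by
  induction l with
  | nil => intro d w h; exact Or.inl h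
  | cons q t ih =>
    intro d w h
    rw [List.foldl_cons] at h
    rcases ih _ w h with h' | h'
    · rcases PySem.Dict.mem_values_insert _ _ _ _ h' with rfl | h''
      · exact Or.inr ⟨q, by simp⟩
      · exact Or.inl h''
    · obtain ⟨p, hp, rfl⟩ := h'
      exact Or.inr ⟨p, by simp [hp]⟩

theorem idxv_lt {cs : List String} (hcs : cs ≠ []) (x : String) : idxv cs x < cs.length := by
  have hpos : 0 < cs.length := List.length_pos_iff.mpr hcs
  rw [idxv, PySem.Dict.getD_eq_get?_getD]
  cases h : (mkIdx cs).get? x with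
  | none => simpa using hpos
  | some v =>
    have hmem : (x, v) ∈ (mkIdx cs).items := PySem.Dict.mem_items_of_get?_eq_some _ h
    have hv : v ∈ (mkIdx cs).values := by
      simp only [PySem.Dict.values]
      exact List.mem_map.mpr ⟨(x, v), hmem, rfl⟩
    rw [mkIdx] at hv
    rcases values_foldl_insert_mem _ _ hv with h' | h'
    · simp [PySem.Dict.values, PySem.Dict.empty] at h'
    · obtain ⟨p, hp, rfl⟩ := h'
      rw [PySem.List.mem_enumerate_iff] at hp
      obtain ⟨k, hk, rfl⟩ := hp
      simpa using hk

theorem cnt_getD_count (cs : List String) (votes : List (List String)) (k : Nat × Nat) :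
    (votes.foldl (fun c r =>
        (combos2 r).foldl (fun c xy =>
          c.insert (idxv cs xy.1, idxv cs xy.2) (c.getD (idxv cs xy.1, idxv cs xy.2) 0 + 1)) c)
        PySem.Dict.empty).getD k 0
      = ((votes.flatMap (pairKeys cs)).count k : Int) := by
  have hinner : ∀ (r : List String) (c : PySem.Dict (Nat × Nat) Int),
      (combos2 r).foldl (fun c xy =>
        c.insert (idxv cs xy.1, idxv cs xy.2) (c.getD (idxv cs xy.1, idxv cs xy.2) 0 + 1)) c
      = (pairKeys cs r).foldl (fun c k => c.insert k (c.getD k 0 + 1)) c := by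
    intro r c
    rw [pairKeys, List.foldl_map]
  simp only [hinner]
  have h2 := foldl_flatMap (pairKeys cs)
    (fun (c : PySem.Dict (Nat × Nat) Int) (k : Nat × Nat) => c.insert k (c.getD k 0 + 1))
    votes PySem.Dict.empty
  rw [← h2]
  rw [PySem.Dict.getD_foldl_insert_add_one]
  simp

theorem dA_eq_foldl_dinc (cs : List String) (votes : List (List String)) (z : List (List Int)) :
    votes.foldl (fun dm ranking =>
      (List.range ranking.length).foldl (fun dm i =>
        (List.range' (i+1) (ranking.length - (i+1))).foldl (fun dm j =>
          mset dm ((mkIdx cs).getD (ranking.getD i "") 0) ((mkIdx cs).getD (ranking.getD j "") 0)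
            (mget dm ((mkIdx cs).getD (ranking.getD i "") 0) ((mkIdx cs).getD (ranking.getD j "") 0) + 1)) dm) dm) z
    = (votes.flatMap (pairKeys cs)).foldl dinc z := by
  have hinner : ∀ (r : List String) (dm : List (List Int)),
      (List.range r.length).foldl (fun dm i =>
        (List.range' (i+1) (r.length - (i+1))).foldl (fun dm j =>
          mset dm ((mkIdx cs).getD (r.getD i "") 0) ((mkIdx cs).getD (r.getD j "") 0)
            (mget dm ((mkIdx cs).getD (r.getD i "") 0) ((mkIdx cs).getD (r.getD j "") 0) + 1)) dm) dm
      = (pairKeys cs r).foldl dinc dm := by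
    intro r dm
    rw [pairKeys, List.foldl_map]
    exact double_loop_eq (fun m x y => dinc m (idxv cs x, idxv cs y)) r dm
  simp only [hinner]
  rw [foldl_flatMap (pairKeys cs) dinc votes z]

theorem keys_in_range {cs : List String} (hcs : cs ≠ []) (votes : List (List String)) :
    ∀ k ∈ votes.flatMap (pairKeys cs), k.1 < cs.length ∧ k.2 < cs.length := by
  intro k hk
  rw [List.mem_flatMap] at hk
  obtain ⟨r, _, hk⟩ := hk
  rw [pairKeys, List.mem_map] at hk
  obtain ⟨xy, _, rfl⟩ := hk
  exact ⟨idxv_lt hcs _, idxv_lt hcs _⟩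

-- write-once build: the inner row fold of A's p-initialisation
theorem build_inner (n i : Nat) (c : Nat → Nat → Prop) [inst : ∀ a b, Decidable (c a b)]
    (v : Nat → Nat → Int) :
    ∀ (l : List Nat) (q : List (List Int)), l.Nodup → (∀ j ∈ l, j < n) → Shaped n q → i < n →
      Shaped n (l.foldl (fun q j => if c i j then mset q i j (v i j) else q) q) ∧
      (∀ a b, a ≠ i →
        mget (l.foldl (fun q j => if c i j then mset q i j (v i j) else q) q) a b = mget q a b) ∧
      (∀ b, mget (l.foldl (fun q j => if c i j then mset q i j (v i j) else q) q) i b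
        = if b ∈ l ∧ c i b then v i b else mget q i b) := by
  intro l
  induction l with
  | nil => intro q _ _ hq _; exact ⟨hq, fun _ _ _ => rfl, fun b => by simp⟩
  | cons j t ih =>
    intro q hnd hb hq hi
    have hjn : j < n := hb j (by simp)
    have hq1 : Shaped n (if c i j then mset q i j (v i j) else q) := by
      split
      · exact shaped_mset hq _ _ _
      · exact hq
    obtain ⟨s1, s2, s3⟩ := ih _ (List.nodup_cons.mp hnd).2 (fun x hx => hb x (by simp [hx])) hq1 hi
    rw [List.foldl_cons]
    refine ⟨s1, ?_, ?_⟩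
    · intro a b ha
      rw [s2 a b ha]
      split
      · exact mget_mset_ne _ (Or.inl ha)
      · rfl
    · intro b
      rw [s3 b]
      rcases Decidable.em (b ∈ t) with hbt | hbt
      · have hbl : b ∈ j :: t := by simp [hbt]
        by_cases hcb : c i b
        · simp [hbt, hbl, hcb]
        · have hbj : b ≠ j := fun h => (List.nodup_cons.mp hnd).1 (h ▸ hbt)
          simp only [hbt, hcb, and_false, if_false, hbl]
          split
          · exact mget_mset_ne _ (Or.inr hbj)
          · rfl
      · have hnotj : b ∈ j :: t ↔ b = j := by simp [hbt]
        rcases eq_or_ne b j with rfl | hbj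
        · have hrow : (q.getD i []).length = n := row_len hq hi
          simp only [hbt, false_and, if_false, hnotj, true_and]
          by_cases hcb : c i b
          · simp only [hcb, if_true]
            exact mget_mset_self _ (hq.1 ▸ hi) (hrow ▸ hjn)
          · simp [hcb]
        · simp only [hbt, false_and, if_false, hnotj, hbj, if_false]
          split
          · exact mget_mset_ne _ (Or.inr hbj)
          · rfl

theorem build_outer (n : Nat) (c : Nat → Nat → Prop) [inst : ∀ a b, Decidable (c a b)]
    (v : Nat → Nat → Int) :
    ∀ (l : List Nat) (q : List (List Int)), l.Nodup → (∀ i ∈ l, i < n) → Shaped n q →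
      Shaped n (l.foldl (fun q i => (List.range n).foldl
          (fun q j => if c i j then mset q i j (v i j) else q) q) q) ∧
      (∀ a b, mget (l.foldl (fun q i => (List.range n).foldl
          (fun q j => if c i j then mset q i j (v i j) else q) q) q) a b
        = if a ∈ l ∧ b < n ∧ c a b then v a b else mget q a b) := by
  intro l
  induction l with
  | nil => intro q _ _ hq; exact ⟨hq, fun a b => by simp⟩
  | cons i t ih =>
    intro q hnd hb hq
    have hin : i < n := hb i (by simp)
    obtain ⟨w1, w2, w3⟩ := build_inner n i c v (List.range n) q (List.nodup_range)
      (fun x hx => List.mem_range.mp hx) hq hin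
    obtain ⟨s1, s2⟩ := ih _ (List.nodup_cons.mp hnd).2 (fun x hx => hb x (by simp [hx])) w1
    rw [List.foldl_cons]
    refine ⟨s1, ?_⟩
    intro a b
    rw [s2 a b]
    rcases Decidable.em (a ∈ t) with hat | hat
    · have hai : a ≠ i := fun h => (List.nodup_cons.mp hnd).1 (h ▸ hat)
      rw [w2 a b hai]
      simp [hat, List.mem_cons.mpr (Or.inr hat)]
    · rcases eq_or_ne a i with rfl | hai
      · have hal : a ∈ a :: t := by simp
        simp only [hat, false_and, if_false, hal, true_and]
        rw [w3 b]
        simp [List.mem_range]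
      · have : a ∈ i :: t ↔ False := by simp [hat, hai]
        simp only [hat, false_and, if_false, this]
        rw [w2 a b hai]

theorem shaped_map_matrix (n : Nat) (f : Nat → Nat → Int) :
    Shaped n ((List.range n).map (fun i => (List.range n).map (fun j => f i j))) := by
  constructor
  · simp
  · intro r hr
    rw [List.mem_map] at hr
    obtain ⟨i, _, rfl⟩ := hr
    simp

theorem mget_map_matrix (n : Nat) (f : Nat → Nat → Int) {a b : Nat} (ha : a < n) (hb : b < n) :
    mget ((List.range n).map (fun i => (List.range n).map (fun j => f i j))) a b = f a b := by
  simp [mget, List.getD_eq_getElem?_getD, List.getElem?_map,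
    List.getElem?_range ha, List.getElem?_range hb]

theorem eq_map_matrix {n : Nat} {m : List (List Int)} (h : Shaped n m) (f : Nat → Nat → Int)
    (he : ∀ a b, a < n → b < n → mget m a b = f a b) :
    m = (List.range n).map (fun i => (List.range n).map (fun j => f i j)) := by
  apply List.ext_getElem
  · simp [h.1]
  · intro a h1 h2
    have han : a < n := by simpa using h2
    apply List.ext_getElem
    · rw [h.2 _ (List.getElem_mem h1)]
      simp
    · intro b g1 g2
      have hbn : b < n := by simpa using g2
      have : m[a][b] = mget m a b := by
        simp [mget, List.getD_eq_getElem?_getD, List.getElem?_eq_getElem h1,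
          List.getElem?_eq_getElem g1]
      rw [this, he a b han hbn]
      simp [List.getElem_map, List.getElem_range]

-- during A's phase with intermediate i, row i and column i are never written,
-- so the in-place sweep computes the same row values as the batch formula
theorem fw_inner (n i j : Nat) (p : List (List Int)) (hij : j ≠ i) (hjn : j < n) :
    ∀ (lk : List Nat) (q : List (List Int)), lk.Nodup → (∀ k ∈ lk, k < n) → Shaped n q →
      (∀ b, b < n → mget q i b = mget p i b) →
      (mget q j i = mget p j i) →
      (∀ b, b ∈ lk → mget q j b = mget p j b) →
      Shaped n (lk.foldl (fun q k => if i = k ∨ j = k then q else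
          if min (mget q j i) (mget q i k) > mget q j k then
            mset q j k (min (mget q j i) (mget q i k)) else q) q) ∧
      (∀ a b, a ≠ j → mget (lk.foldl (fun q k => if i = k ∨ j = k then q else
          if min (mget q j i) (mget q i k) > mget q j k then
            mset q j k (min (mget q j i) (mget q i k)) else q) q) a b = mget q a b) ∧
      (∀ b, mget (lk.foldl (fun q k => if i = k ∨ j = k then q else
          if min (mget q j i) (mget q i k) > mget q j k then
            mset q j k (min (mget q j i) (mget q i k)) else q) q) j b
        = if b ∈ lk ∧ ¬(i = b ∨ j = b) then
            max (mget q j b) (min (mget p j i) (mget p i b)) else mget q j b) := by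
  intro lk
  induction lk with
  | nil => intro q _ _ hq _ _ _; exact ⟨hq, fun _ _ _ => rfl, fun b => by simp⟩
  | cons k t ih =>
    intro q hnd hkx hq hrowi hqji hrowj
    have hkn : k < n := hkx k (by simp)
    rw [List.foldl_cons]
    by_cases hc : i = k ∨ j = k
    · simp only [hc, if_true]
      obtain ⟨s1, s2, s3⟩ := ih q (List.nodup_cons.mp hnd).2 (fun x hx => hkx x (by simp [hx]))
        hq hrowi hqji (fun b hb => hrowj b (by simp [hb]))
      refine ⟨s1, s2, ?_⟩
      intro b
      rw [s3 b]
      by_cases hbk : b = k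
      · subst hbk
        simp [hc]
      · by_cases hbt : b ∈ t <;> simp [hbt, hbk]
    · simp only [hc, if_false]
      have hpot : min (mget q j i) (mget q i k) = min (mget p j i) (mget p i k) := by
        rw [hqji, hrowi k hkn]
      set pot := min (mget q j i) (mget q i k) with hpotdef
      have hjq : j < q.length := hq.1 ▸ hjn
      have hkq : k < (q.getD j []).length := (row_len hq hjn).symm ▸ hkn
      have hq1 : Shaped n (if pot > mget q j k then mset q j k pot else q) := by
        split
        · exact shaped_mset hq _ _ _
        · exact hq
      have hq1jk : mget (if pot > mget q j k then mset q j k pot else q) j k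
          = max (mget q j k) pot := by
        split
        · rw [mget_mset_self _ hjq hkq, max_eq_right (le_of_lt (by assumption))]
        · rw [max_eq_left (le_of_not_gt (by assumption))]
      have hq1ne : ∀ a b, a ≠ j ∨ b ≠ k →
          mget (if pot > mget q j k then mset q j k pot else q) a b = mget q a b := by
        intro a b hab
        split
        · exact mget_mset_ne _ hab
        · rfl
      have hik : i ≠ k := fun h => hc (Or.inl h)
      have hjk : j ≠ k := fun h => hc (Or.inr h)
      have hknt : k ∉ t := (List.nodup_cons.mp hnd).1
      obtain ⟨s1, s2, s3⟩ := ih _ (List.nodup_cons.mp hnd).2 (fun x hx => hkx x (by simp [hx]))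
        hq1 (fun b hb => by rw [hq1ne i b (Or.inl (Ne.symm hij))]; exact hrowi b hb)
        (by rw [hq1ne j i (Or.inr hik)]; exact hqji)
        (fun b hb => by
          rw [hq1ne j b (Or.inr (fun h => hknt (h ▸ hb)))]
          exact hrowj b (by simp [hb]))
      refine ⟨s1, ?_, ?_⟩
      · intro a b ha
        rw [s2 a b ha, hq1ne a b (Or.inl ha)]
      · intro b
        rw [s3 b]
        by_cases hbk : b = k
        · subst hbk
          have hnt : b ∉ t := hknt
          simp only [hnt, false_and, if_false]
          rw [hq1jk]
          rw [if_pos (⟨by simp, hc⟩ : b ∈ b :: t ∧ ¬(i = b ∨ j = b)), hpot]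
        · by_cases hbt : b ∈ t
          · have hbl : b ∈ k :: t := by simp [hbt]
            by_cases hib : i = b ∨ j = b
            · simp only [hbt, hib, not_true, and_false, if_false, hbl]
              exact hq1ne j b (Or.inr hbk)
            · simp only [hbt, hib, not_false_iff, and_true, if_true, hbl]
              rw [hq1ne j b (Or.inr hbk)]
          · have hbl : b ∉ k :: t := by simp [hbt, hbk]
            simp only [hbt, false_and, if_false, hbl]
            exact hq1ne j b (Or.inr hbk)

theorem fw_middle (n i : Nat) (p : List (List Int)) :
    ∀ (lj : List Nat) (q : List (List Int)), lj.Nodup → (∀ j ∈ lj, j < n) → Shaped n q →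
      (∀ b, b < n → mget q i b = mget p i b) →
      (∀ a b, a ∈ lj → mget q a b = mget p a b) →
      Shaped n (lj.foldl (fun q j => if i = j then q else
          (List.range n).foldl (fun q k => if i = k ∨ j = k then q else
            if min (mget q j i) (mget q i k) > mget q j k then
              mset q j k (min (mget q j i) (mget q i k)) else q) q) q) ∧
      (∀ a b, a ∉ lj → mget (lj.foldl (fun q j => if i = j then q else
          (List.range n).foldl (fun q k => if i = k ∨ j = k then q else
            if min (mget q j i) (mget q i k) > mget q j k then
              mset q j k (min (mget q j i) (mget q i k)) else q) q) q) a b = mget q a b) ∧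
      (∀ a b, a ∈ lj → mget (lj.foldl (fun q j => if i = j then q else
          (List.range n).foldl (fun q k => if i = k ∨ j = k then q else
            if min (mget q j i) (mget q i k) > mget q j k then
              mset q j k (min (mget q j i) (mget q i k)) else q) q) q) a b
        = if a = i then mget p a b
          else if (i = b ∨ a = b) ∨ ¬ b < n then mget p a b
          else max (mget p a b) (min (mget p a i) (mget p i b))) := by
  intro lj
  induction lj with
  | nil => intro q _ _ hq _ _; exact ⟨hq, fun _ _ _ => rfl, fun a b h => absurd h (List.not_mem_nil)⟩
  | cons j t ih =>
    intro q hnd hjx hq hrowi horig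
    have hjn : j < n := hjx j (by simp)
    have hjnt : j ∉ t := (List.nodup_cons.mp hnd).1
    rw [List.foldl_cons]
    by_cases hc : i = j
    · subst hc
      rw [if_pos rfl]
      obtain ⟨s1, s2, s3⟩ := ih q (List.nodup_cons.mp hnd).2 (fun x hx => hjx x (by simp [hx]))
        hq hrowi (fun a b ha => horig a b (by simp [ha]))
      refine ⟨s1, ?_, ?_⟩
      · intro a b ha
        exact s2 a b (fun h => ha (by simp [h]))
      · intro a b ha
        rcases List.mem_cons.mp ha with rfl | hat
        · rw [s2 a b hjnt, if_pos rfl]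
          exact horig a b (by simp)
        · exact s3 a b hat
    · simp only [hc, if_false]
      obtain ⟨w1, w2, w3⟩ := fw_inner n i j p (fun h => hc h.symm) hjn (List.range n) q
        List.nodup_range (fun x hx => List.mem_range.mp hx) hq hrowi
        (horig j i (by simp)) (fun b _ => horig j b (by simp))
      obtain ⟨s1, s2, s3⟩ := ih _ (List.nodup_cons.mp hnd).2 (fun x hx => hjx x (by simp [hx]))
        w1 (fun b hb => by rw [w2 i b hc]; exact hrowi b hb)
        (fun a b ha => by
          rw [w2 a b (fun h => hjnt (h ▸ ha))]
          exact horig a b (by simp [ha]))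
      refine ⟨s1, ?_, ?_⟩
      · intro a b ha
        rw [s2 a b (fun h => ha (by simp [h])), w2 a b (fun h => ha (by simp [h]))]
      · intro a b ha
        rcases List.mem_cons.mp ha with rfl | hat
        · rw [s2 a b hjnt, w3 b]
          have hai : a ≠ i := fun h => hc h.symm
          rw [if_neg hai]
          simp only [List.mem_range]
          by_cases hbn : b < n
          · by_cases hib : i = b ∨ a = b
            · rw [if_neg (by simp [hib]), if_pos (Or.inl hib)]
              exact horig a b (by simp)
            · rw [if_pos ⟨hbn, hib⟩, if_neg (by simp [hib, hbn]), horig a b (by simp)]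
          · rw [if_neg (by simp [hbn]), if_pos (Or.inr hbn)]
            exact horig a b (by simp)
        · exact s3 a b hat

theorem phase_eq (n i : Nat) (p : List (List Int))
    (hsh : Shaped n p) (hz : ZDiag n p) :
    (List.range n).foldl (fun q j => if i = j then q else
        (List.range n).foldl (fun q k => if i = k ∨ j = k then q else
          if min (mget q j i) (mget q i k) > mget q j k then
            mset q j k (min (mget q j i) (mget q i k)) else q) q) p
    = (List.range n).map (fun j => (List.range n).map (fun k =>
        if j = k then 0 else max (mget p j k) (min (mget p j i) (mget p i k)))) := by
  obtain ⟨s1, _, s3⟩ := fw_middle n i p (List.range n) p List.nodup_range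
    (fun x hx => List.mem_range.mp hx) hsh (fun _ _ => rfl) (fun _ _ _ => rfl)
  apply eq_map_matrix s1
  intro a b ha hb
  rw [s3 a b (List.mem_range.mpr ha)]
  by_cases hai : a = i
  · rw [if_pos hai]
    by_cases hab : a = b
    · rw [if_pos hab, ← hab]
      exact hz a ha
    · rw [if_neg hab, show i = a from hai.symm, hz a ha]
      exact (max_eq_left (min_le_right _ _)).symm
  · rw [if_neg hai]
    by_cases hib : i = b
    · have hab : a ≠ b := fun h => hai (h.trans hib.symm)
      rw [if_pos (Or.inl (Or.inl hib)), if_neg hab, hib, hz b hb]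
      exact (max_eq_left (min_le_left _ _)).symm
    · by_cases hab : a = b
      · rw [if_pos (Or.inl (Or.inr hab)), if_pos hab, ← hab]
        exact hz a ha
      · rw [if_neg (by simp [hib, hab, hb]), if_neg hab]

-- ===================== the widest-path core: Floyd-Warshall = Bellman-Ford =====================

-- one Floyd-Warshall phase (pivot i) as a function on weight functions
def fwF (g : Nat → Nat → Int) (i : Nat) : Nat → Nat → Int :=
  fun j k => if j = k then 0 else max (g j k) (min (g j i) (g i k))

def gsF (w : Nat → Nat → Int) (m : Nat) : Nat → Nat → Int := (List.range m).foldl fwF w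

-- one Bellman-Ford relaxation round as a function on capacity functions
def relaxF (n : Nat) (w : Nat → Nat → Int) (f : Nat → Int) : Nat → Int :=
  fun v => (List.range n).foldl (fun best u => max best (min (f u) (w u v))) (f v)

-- bottleneck of a walk j :: l ++ [k]
def bn (w : Nat → Nat → Int) : Nat → List Nat → Nat → Int
  | j, [], k => w j k
  | j, v :: vs, k => min (w j v) (bn w v vs k)

theorem bn_append (w : Nat → Nat → Int) (v : Nat) (l2 : List Nat) (k : Nat) :
    ∀ (l1 : List Nat) (j : Nat),
      bn w j (l1 ++ v :: l2) k = min (bn w j l1 v) (bn w v l2 k) := by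
  intro l1
  induction l1 with
  | nil => intro j; simp [bn]
  | cons a t ih =>
    intro j
    simp only [List.cons_append, bn, ih a, min_assoc]

theorem gsF_succ (w : Nat → Nat → Int) (m : Nat) :
    gsF w (m+1) = fwF (gsF w m) m := by
  unfold gsF
  rw [List.range_succ, List.foldl_append]
  rfl

theorem gsF_diag (w : Nat → Nat → Int) (hd : ∀ a, w a a = 0) (m a : Nat) :
    gsF w m a a = 0 := by
  cases m with
  | zero => exact hd a
  | succ m => rw [gsF_succ]; simp [fwF]

theorem gsF_nonneg (w : Nat → Nat → Int) (hp : ∀ a b, 0 ≤ w a b) (m : Nat) :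
    ∀ a b, 0 ≤ gsF w m a b := by
  induction m with
  | zero => exact hp
  | succ m ih =>
    intro a b
    rw [gsF_succ]
    unfold fwF
    split
    · exact le_refl 0
    · exact le_trans (ih a b) (le_max_left _ _)

theorem gsF_pivot_right (w : Nat → Nat → Int) (hd : ∀ a, w a a = 0)
    (hp : ∀ a b, 0 ≤ w a b) (m j : Nat) (hj : j ≠ m) :
    gsF w (m+1) j m = gsF w m j m := by
  rw [gsF_succ]
  unfold fwF
  rw [if_neg hj, gsF_diag w hd m m]
  have h1 := gsF_nonneg w hp m j m
  omega

theorem gsF_pivot_left (w : Nat → Nat → Int) (hd : ∀ a, w a a = 0)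
    (hp : ∀ a b, 0 ≤ w a b) (m k : Nat) (hk : m ≠ k) :
    gsF w (m+1) m k = gsF w m m k := by
  rw [gsF_succ]
  unfold fwF
  rw [if_neg hk, gsF_diag w hd m m]
  have h1 := gsF_nonneg w hp m m k
  omega

-- every walk with intermediates < m has bottleneck at most the FW value
theorem fw_ub (w : Nat → Nat → Int) (hd : ∀ a, w a a = 0) (hp : ∀ a b, 0 ≤ w a b) :
    ∀ (m : Nat) (l : List Nat) (j k : Nat), j ≠ k → (∀ v ∈ l, v < m) →
      bn w j l k ≤ gsF w m j k := by
  intro m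
  induction m with
  | zero =>
    intro l j k hjk hl
    cases l with
    | nil => exact le_of_eq rfl
    | cons a t => exact absurd (hl a (by simp)) (Nat.not_lt_zero a)
  | succ m ih =>
    have mono : ∀ (l : List Nat) (j k : Nat), j ≠ k → (∀ v ∈ l, v < m+1) → m ∉ l →
        bn w j l k ≤ gsF w (m+1) j k := by
      intro l j k hjk hl hm
      have hl' : ∀ v ∈ l, v < m := fun v hv =>
        lt_of_le_of_ne (Nat.lt_succ_iff.mp (hl v hv)) (fun he => hm (he ▸ hv))
      calc bn w j l k ≤ gsF w m j k := ih l j k hjk hl'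
        _ ≤ gsF w (m+1) j k := by
            rw [gsF_succ]; unfold fwF; rw [if_neg hjk]; exact le_max_left _ _
    have aux : ∀ (c : Nat) (l : List Nat) (j k : Nat), l.count m ≤ c → j ≠ k →
        (∀ v ∈ l, v < m+1) → bn w j l k ≤ gsF w (m+1) j k := by
      intro c
      induction c with
      | zero =>
        intro l j k hc hjk hl
        have hm : m ∉ l := by
          intro hm
          have := List.count_pos_iff.mpr hm
          omega
        exact mono l j k hjk hl hm
      | succ c ihc =>
        intro l j k hc hjk hl
        by_cases hm : m ∈ l
        · obtain ⟨l1, l2, rfl⟩ := List.append_of_mem hm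
          have hcnt : l1.count m + l2.count m ≤ c := by
            have h : (l1 ++ m :: l2).count m = l1.count m + (l2.count m + 1) := by
              simp
            omega
          have hl1 : ∀ v ∈ l1, v < m+1 := fun v hv => hl v (by simp [hv])
          have hl2 : ∀ v ∈ l2, v < m+1 := fun v hv => hl v (by simp [hv])
          rw [bn_append]
          by_cases hjm : j = m
          · subst hjm
            exact le_trans (min_le_right _ _) (ihc l2 j k (by omega) hjk hl2)
          · by_cases hkm : k = m
            · subst hkm
              exact le_trans (min_le_left _ _) (ihc l1 j k (by omega) hjk hl1)
            · have h1 : bn w j l1 m ≤ gsF w (m+1) j m := ihc l1 j m (by omega) hjm hl1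
              have h2 : bn w m l2 k ≤ gsF w (m+1) m k :=
                ihc l2 m k (by omega) (fun h => hkm h.symm) hl2
              rw [gsF_pivot_right w hd hp m j hjm] at h1
              rw [gsF_pivot_left w hd hp m k (fun h => hkm h.symm)] at h2
              rw [gsF_succ]
              unfold fwF
              rw [if_neg hjk]
              exact le_trans (min_le_min h1 h2) (le_max_right _ _)
        · exact mono l j k hjk hl hm
    intro l j k hjk hl
    exact aux (l.count m) l j k le_rfl hjk hl

-- the FW value is the bottleneck of some walk with intermediates < m
theorem fw_ex (w : Nat → Nat → Int) (hd : ∀ a, w a a = 0) (hp : ∀ a b, 0 ≤ w a b) :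
    ∀ (m j k : Nat), j ≠ k → ∃ l, (∀ v ∈ l, v < m) ∧ gsF w m j k = bn w j l k := by
  intro m
  induction m with
  | zero => intro j k _; exact ⟨[], by simp, rfl⟩
  | succ m ih =>
    intro j k hjk
    rw [gsF_succ]
    unfold fwF
    rw [if_neg hjk]
    by_cases hle : min (gsF w m j m) (gsF w m m k) ≤ gsF w m j k
    · obtain ⟨l, hl, he⟩ := ih j k hjk
      exact ⟨l, fun v hv => Nat.lt_succ_of_lt (hl v hv), by rw [max_eq_left hle, he]⟩
    · rw [not_le] at hle
      have hjm : j ≠ m := by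
        intro he
        rw [he] at hle
        rw [gsF_diag w hd m m] at hle
        have h1 := gsF_nonneg w hp m m k
        have h2 := gsF_nonneg w hp m m m
        omega
      have hkm : k ≠ m := by
        intro he
        rw [he] at hle
        rw [gsF_diag w hd m m] at hle
        have h1 := gsF_nonneg w hp m j m
        omega
      obtain ⟨l1, hl1, he1⟩ := ih j m hjm
      obtain ⟨l2, hl2, he2⟩ := ih m k (fun h => hkm h.symm)
      refine ⟨l1 ++ m :: l2, ?_, ?_⟩
      · intro v hv
        rcases List.mem_append.mp hv with h | h
        · exact Nat.lt_succ_of_lt (hl1 v h)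
        · rcases List.mem_cons.mp h with rfl | h
          · exact Nat.lt_succ_self v
          · exact Nat.lt_succ_of_lt (hl2 v h)
      · rw [bn_append, ← he1, ← he2, max_eq_right (le_of_lt hle)]

-- generic foldl-max facts
theorem fm_ge_init {α : Type} (f : α → Int) :
    ∀ (l : List α) (b : Int), b ≤ l.foldl (fun m x => max m (f x)) b := by
  intro l
  induction l with
  | nil => intro b; exact le_refl b
  | cons a t ih => intro b; exact le_trans (le_max_left b (f a)) (ih (max b (f a)))

theorem fm_ge_mem {α : Type} (f : α → Int) :
    ∀ (l : List α) (b : Int) (x : α), x ∈ l → f x ≤ l.foldl (fun m x => max m (f x)) b := by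
  intro l
  induction l with
  | nil => intro b x hx; exact absurd hx (List.not_mem_nil)
  | cons a t ih =>
    intro b x hx
    rcases List.mem_cons.mp hx with rfl | hx
    · exact le_trans (le_max_right b (f x)) (fm_ge_init f t (max b (f x)))
    · exact ih (max b (f a)) x hx

theorem fm_cases {α : Type} (f : α → Int) :
    ∀ (l : List α) (b : Int),
      l.foldl (fun m x => max m (f x)) b = b ∨
        ∃ x ∈ l, l.foldl (fun m x => max m (f x)) b = f x := by
  intro l
  induction l with
  | nil => intro b; exact Or.inl rfl
  | cons a t ih =>
    intro b
    rw [List.foldl_cons]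
    rcases ih (max b (f a)) with he | ⟨x, hx, he⟩
    · rcases max_choice b (f a) with hm | hm
      · exact Or.inl (by rw [he, hm])
      · exact Or.inr ⟨a, by simp, by rw [he, hm]⟩
    · exact Or.inr ⟨x, by simp [hx], he⟩

-- every walk of length ≤ r with vertices < n has bottleneck at most the BF value
theorem bf_ub (n : Nat) (w : Nat → Nat → Int) (s : Nat) :
    ∀ (r : Nat) (l : List Nat) (v : Nat), (∀ u ∈ l, u < n) → l.length ≤ r →
      bn w s l v ≤ (relaxF n w)^[r] (fun t => w s t) v := by
  intro r
  induction r with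
  | zero =>
    intro l v hl hlen
    have hnil : l = [] := List.eq_nil_of_length_eq_zero (Nat.le_zero.mp hlen)
    subst hnil
    exact le_of_eq rfl
  | succ r ih =>
    intro l v hl hlen
    rw [Function.iterate_succ_apply']
    rcases List.eq_nil_or_concat l with rfl | ⟨l', u, rfl⟩
    · have h1 : bn w s [] v ≤ (relaxF n w)^[r] (fun t => w s t) v := ih [] v (by simp) (Nat.zero_le r)
      calc bn w s [] v ≤ (relaxF n w)^[r] (fun t => w s t) v := h1
        _ ≤ relaxF n w ((relaxF n w)^[r] (fun t => w s t)) v := fm_ge_init _ _ _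
    · simp only [List.concat_eq_append] at hl hlen ⊢
      have hu : u < n := hl u (by simp)
      have hlen' : l'.length ≤ r := by
        rw [List.length_append] at hlen
        simpa using hlen
      have h1 : bn w s l' u ≤ (relaxF n w)^[r] (fun t => w s t) u :=
        ih l' u (fun x hx => hl x (by simp [hx])) hlen'
      have hsplit : bn w s (l' ++ [u]) v = min (bn w s l' u) (w u v) := by
        have h := bn_append w u [] v l' s
        simpa [bn] using h
      rw [hsplit]
      have h2 : min ((relaxF n w)^[r] (fun t => w s t) u) (w u v)
          ≤ relaxF n w ((relaxF n w)^[r] (fun t => w s t)) v :=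
        fm_ge_mem (fun u => min ((relaxF n w)^[r] (fun t => w s t) u) (w u v))
          (List.range n) _ u (List.mem_range.mpr hu)
      exact le_trans (min_le_min h1 le_rfl) h2

-- the BF value is the bottleneck of some walk with vertices < n
theorem bf_ex (n : Nat) (w : Nat → Nat → Int) (s : Nat) :
    ∀ (r : Nat) (v : Nat), ∃ l, (∀ u ∈ l, u < n) ∧
      bn w s l v = (relaxF n w)^[r] (fun t => w s t) v := by
  intro r
  induction r with
  | zero => intro v; exact ⟨[], by simp, rfl⟩
  | succ r ih =>
    intro v
    rw [Function.iterate_succ_apply']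
    rcases fm_cases (fun u => min ((relaxF n w)^[r] (fun t => w s t) u) (w u v))
        (List.range n) ((relaxF n w)^[r] (fun t => w s t) v) with he | ⟨u, hu, he⟩
    · obtain ⟨l, hl, hb⟩ := ih v
      exact ⟨l, hl, by rw [hb]; exact he.symm⟩
    · obtain ⟨l, hl, hb⟩ := ih u
      refine ⟨l ++ [u], ?_, ?_⟩
      · intro x hx
        rcases List.mem_append.mp hx with h | h
        · exact hl x h
        · rcases List.mem_cons.mp h with rfl | h
          · exact List.mem_range.mp hu
          · exact absurd h (List.not_mem_nil)
      · have hsplit : bn w s (l ++ [u]) v = min (bn w s l u) (w u v) := by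
          have h := bn_append w u [] v l s
          simpa [bn] using h
        rw [hsplit, hb]
        exact he.symm

-- any non-nodup list splits at a repeated element
theorem dup_split : ∀ (l : List Nat), ¬ l.Nodup →
    ∃ v l1 l2 l3, l = l1 ++ v :: l2 ++ v :: l3 := by
  intro l
  induction l with
  | nil => intro h; exact absurd List.nodup_nil h
  | cons a t ih =>
    intro h
    by_cases ha : a ∈ t
    · obtain ⟨l2, l3, rfl⟩ := List.append_of_mem ha
      exact ⟨a, [], l2, l3, by simp⟩
    · have ht : ¬ t.Nodup := fun hn => h (List.nodup_cons.mpr ⟨ha, hn⟩)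
      obtain ⟨v, l1, l2, l3, rfl⟩ := ih ht
      exact ⟨v, a :: l1, l2, l3, by simp⟩

-- cycle removal: a walk can be deduplicated without decreasing the bottleneck
theorem shorten (w : Nat → Nat → Int) (j k : Nat) :
    ∀ (c : Nat) (l : List Nat), l.length ≤ c →
      ∃ l', l'.Nodup ∧ (∀ x ∈ l', x ∈ l) ∧ bn w j l k ≤ bn w j l' k := by
  intro c
  induction c with
  | zero =>
    intro l hl
    have hnil : l = [] := List.eq_nil_of_length_eq_zero (Nat.le_zero.mp hl)
    subst hnil
    exact ⟨[], List.nodup_nil, fun x hx => hx, le_rfl⟩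
  | succ c ih =>
    intro l hl
    by_cases hnd : l.Nodup
    · exact ⟨l, hnd, fun x hx => hx, le_rfl⟩
    · obtain ⟨v, l1, l2, l3, rfl⟩ := dup_split l hnd
      have hlen : (l1 ++ v :: l3).length ≤ c := by
        simp only [List.length_append, List.length_cons] at hl ⊢
        omega
      have hle : bn w j (l1 ++ v :: l2 ++ v :: l3) k ≤ bn w j (l1 ++ v :: l3) k := by
        have h1 : l1 ++ v :: l2 ++ v :: l3 = l1 ++ v :: (l2 ++ v :: l3) := by simp
        rw [h1, bn_append, bn_append, bn_append]
        exact min_le_min le_rfl (min_le_right _ _)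
      obtain ⟨l', hnd', hsub, hle'⟩ := ih (l1 ++ v :: l3) hlen
      refine ⟨l', hnd', ?_, le_trans hle hle'⟩
      intro x hx
      have h := hsub x hx
      simp only [List.mem_append, List.mem_cons] at h ⊢
      tauto

theorem nodup_length_le (n : Nat) (l : List Nat) (hnd : l.Nodup) (hl : ∀ x ∈ l, x < n) :
    l.length ≤ n := by
  have h1 : l.length = l.toFinset.card := (List.toFinset_card_of_nodup hnd).symm
  have h2 : l.toFinset ⊆ Finset.range n := by
    intro x hx
    rw [List.mem_toFinset] at hx
    rw [Finset.mem_range]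
    exact hl x hx
  calc l.length = l.toFinset.card := h1
    _ ≤ (Finset.range n).card := Finset.card_le_card h2
    _ = n := Finset.card_range n

-- the bridge: n-pivot Floyd-Warshall = n-round Bellman-Ford, off the diagonal
theorem fw_eq_bf (n : Nat) (w : Nat → Nat → Int) (hd : ∀ a, w a a = 0)
    (hp : ∀ a b, 0 ≤ w a b) (s v : Nat) (hsv : s ≠ v) :
    gsF w n s v = (relaxF n w)^[n] (fun t => w s t) v := by
  apply le_antisymm
  · obtain ⟨l, hl, he⟩ := fw_ex w hd hp n s v hsv
    rw [he]
    obtain ⟨l', hnd, hsub, hle⟩ := shorten w s v l.length l le_rfl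
    have hl' : ∀ x ∈ l', x < n := fun x hx => hl x (hsub x hx)
    exact le_trans hle (bf_ub n w s n l' v hl' (nodup_length_le n l' hnd hl'))
  · obtain ⟨l, hl, he⟩ := bf_ex n w s n v
    rw [← he]
    exact fw_ub w hd hp n l s v hsv hl

-- ===================== plumbing: lists ↔ functions =====================

theorem mapRange_getD {n : Nat} (f : Nat → Int) {v : Nat} (h : v < n) :
    ((List.range n).map f).getD v 0 = f v := by
  simp [List.getD_eq_getElem?_getD, List.getElem?_map, List.getElem?_range h]

theorem foldl_const {α β : Type} (F : β → β) :
    ∀ (l : List α) (b : β), l.foldl (fun c _ => F c) b = F^[l.length] b := by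
  intro l
  induction l with
  | nil => intro b; rfl
  | cons a t ih =>
    intro b
    rw [List.foldl_cons, ih (F b), List.length_cons, Function.iterate_succ_apply]

theorem round_map (n : Nat) (w : Nat → Nat → Int) (f : Nat → Int) :
    (List.range n).foldl (fun nc v => nc ++ [(List.range n).foldl (fun best u =>
        let c := min (((List.range n).map f).getD u 0) (w u v)
        if c > best then c else best) (((List.range n).map f).getD v 0)]) []
    = (List.range n).map (relaxF n w f) := by
  rw [PySem.List.foldl_append_singleton_eq_map, List.nil_append]
  apply List.map_congr_left
  intro v hv
  have hvn := List.mem_range.mp hv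
  unfold relaxF
  rw [mapRange_getD f hvn]
  apply PySem.List.foldl_congr_mem
  intro acc u hu
  have hun := List.mem_range.mp hu
  rw [mapRange_getD f hun]
  dsimp only
  split_ifs with h <;> omega

theorem iter_map (n : Nat) (w : Nat → Nat → Int) :
    ∀ (r : Nat) (f : Nat → Int),
      (fun cap => (List.range n).foldl (fun nc v => nc ++ [(List.range n).foldl (fun best u =>
          let c := min (cap.getD u 0) (w u v)
          if c > best then c else best) (cap.getD v 0)]) [])^[r] ((List.range n).map f)
      = (List.range n).map ((relaxF n w)^[r] f) := by
  intro r
  induction r with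
  | zero => intro f; rfl
  | succ r ih =>
    intro f
    rw [Function.iterate_succ_apply, Function.iterate_succ_apply]
    rw [round_map n w f]
    exact ih (relaxF n w f)

theorem set_map_range (n : Nat) (g : Nat → Int) (s : Nat) :
    ((List.range n).map g).set s 0 = (List.range n).map (fun k => if k = s then 0 else g k) := by
  apply List.ext_getElem
  · simp
  · intro i h1 h2
    rw [List.getElem_set]
    have hin : i < n := by simpa using h2
    rw [List.getElem_map, List.getElem_map, List.getElem_range]
    by_cases his : i = s
    · rw [if_pos his.symm, if_pos his]
    · rw [if_neg (fun h => his h.symm), if_neg his]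

theorem bfRow_eq (n : Nat) (w : Nat → Nat → Int) (s : Nat) :
    bfRow n w s = (List.range n).map (fun k =>
      if k = s then 0 else (relaxF n w)^[n] (fun t => w s t) k) := by
  simp only [bfRow]
  rw [foldl_const]
  rw [List.length_range]
  rw [iter_map n w n (fun v => w s v)]
  exact set_map_range n _ s

-- A's full in-place FW fold on a function matrix computes gsF rows
theorem fw_fold_fun (n : Nat) :
    ∀ (l : List Nat) (g : Nat → Nat → Int),
      (∀ i ∈ l, i < n) → (∀ a, g a a = 0) → (∀ a b, 0 ≤ g a b) →
      l.foldl (fun q i => (List.range n).foldl (fun q j => if i = j then q else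
          (List.range n).foldl (fun q k => if i = k ∨ j = k then q else
            if min (mget q j i) (mget q i k) > mget q j k then
              mset q j k (min (mget q j i) (mget q i k)) else q) q) q)
        ((List.range n).map (fun a => (List.range n).map (fun b => g a b)))
      = (List.range n).map (fun a => (List.range n).map (fun b => (l.foldl fwF g) a b)) := by
  intro l
  induction l with
  | nil => intro g _ _ _; rfl
  | cons i t ih =>
    intro g hl hd hp
    have hin : i < n := hl i (by simp)
    rw [List.foldl_cons, List.foldl_cons]
    have hsh := shaped_map_matrix n (fun a b => g a b)
    have hz : ZDiag n ((List.range n).map fun a => (List.range n).map fun b => g a b) := by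
      intro a ha
      rw [mget_map_matrix n _ ha ha]
      exact hd a
    rw [phase_eq n i _ hsh hz]
    have hstep : (List.range n).map (fun j => (List.range n).map (fun k =>
        if j = k then 0 else
          max (mget ((List.range n).map fun a => (List.range n).map fun b => g a b) j k)
            (min (mget ((List.range n).map fun a => (List.range n).map fun b => g a b) j i)
              (mget ((List.range n).map fun a => (List.range n).map fun b => g a b) i k))))
        = (List.range n).map (fun a => (List.range n).map (fun b => fwF g i a b)) := by
      apply List.map_congr_left
      intro j hj
      have hjn := List.mem_range.mp hj
      apply List.map_congr_left
      intro k hk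
      have hkn := List.mem_range.mp hk
      rw [mget_map_matrix n _ hjn hkn, mget_map_matrix n _ hjn hin, mget_map_matrix n _ hin hkn]
      rfl
    rw [hstep]
    exact ih (fwF g i) (fun x hx => hl x (by simp [hx])) (fun a => by simp [fwF])
      (fun a b => by
        unfold fwF
        split
        · exact le_refl 0
        · exact le_trans (hp a b) (le_max_left _ _))

-- the clean count-based edge-weight function both pipelines reduce to
def wOf (cs : List String) (votes : List (List String)) : Nat → Nat → Int :=
  fun a b => if a ≠ b ∧ ((votes.flatMap (pairKeys cs)).count (a, b) : Int)
        > ((votes.flatMap (pairKeys cs)).count (b, a) : Int)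
    then ((votes.flatMap (pairKeys cs)).count (a, b) : Int) else 0

theorem wOf_diag (cs : List String) (votes : List (List String)) (a : Nat) :
    wOf cs votes a a = 0 := by
  simp [wOf]

theorem wOf_nonneg (cs : List String) (votes : List (List String)) (a b : Nat) :
    0 ≤ wOf cs votes a b := by
  unfold wOf
  split
  · exact Int.natCast_nonneg _
  · exact le_refl 0

theorem winnerCheckA_all (p : List (List Int)) (i : Nat) :
    ∀ l : List Nat, winnerCheckA p i l
      = l.all (fun j => j == i || decide (mget p j i ≤ mget p i j)) := by
  intro l
  induction l with
  | nil => rfl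
  | cons j js ih =>
    rw [winnerCheckA, List.all_cons, ← ih]
    by_cases h1 : i = j
    · subst h1
      simp
    · by_cases h2 : mget p j i > mget p i j
      · rw [if_pos ⟨h1, h2⟩]
        have hji : (j == i) = false := beq_eq_false_iff_ne.mpr (fun h => h1 h.symm)
        simp [hji, not_le.mpr h2]
      · rw [if_neg (fun hc => h2 hc.2)]
        simp [not_lt.mp h2]

theorem winners_eq (p : List (List Int)) (cands : List String) :
    (List.range cands.length).foldl (fun w i =>
        if winnerCheckA p i (List.range cands.length) then w ++ [cands.getD i ""] else w) []
    = ((PySem.List.enumerate cands).filter (fun ic =>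
        (List.range cands.length).all (fun j => j == ic.1.toNat ||
          decide (mget p j ic.1.toNat ≤ mget p ic.1.toNat j)))).map (fun ic => ic.2) := by
  rw [PySem.List.foldl_append_if, PySem.List.enumerate_eq_map_pyRange (d := ""), List.filter_map,
    List.map_map]
  have hpr : PySem.List.pyRange 0 (PySem.List.len cands) 1
      = (List.range cands.length).map (fun (k : Nat) => (k : Int)) := by
    rw [PySem.List.len_eq, PySem.List.pyRange_one]
    have h1 : (((cands.length : Int)) - 0).toNat = cands.length := by omega
    rw [h1]
    apply List.map_congr_left
    intro k _
    omega
  rw [hpr, List.filter_map, List.map_map]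
  rw [List.nil_append]
  have hmap : ∀ k : Nat, ((fun ic => ic.2) ∘ (fun j => ((j : Int), PySem.List.pyGetD cands j ""))
      ∘ (fun k : Nat => (k : Int))) k = cands.getD k "" := by
    intro k
    simp [Function.comp, PySem.List.pyGetD_natCast]
  have hfil : ∀ k : Nat, ((fun ic => (List.range cands.length).all (fun j => j == ic.1.toNat ||
        decide (mget p j ic.1.toNat ≤ mget p ic.1.toNat j)))
        ∘ (fun j => ((j : Int), PySem.List.pyGetD cands j "")) ∘ (fun k : Nat => (k : Int))) k
      = winnerCheckA p k (List.range cands.length) := by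
    intro k
    rw [winnerCheckA_all]
    simp [Function.comp]
  calc ((List.range cands.length).filter (fun i => winnerCheckA p i (List.range cands.length))).map
        (fun i => cands.getD i "")
      = ((List.range cands.length).filter (fun i => winnerCheckA p i (List.range cands.length))).map
        ((fun ic => ic.2) ∘ (fun j => ((j : Int), PySem.List.pyGetD cands j ""))
          ∘ (fun k : Nat => (k : Int))) := by
        apply List.map_congr_left
        intro k _
        exact (hmap k).symm
    _ = _ := by
        congr 1
        apply List.filter_congr
        intro k _
        exact (hfil k).symm

-- ===== VERDICT (by name: the statement is the Claim_ definition above) =====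
theorem calculate_schulze_winners_spec : Claim_equal_calculate_schulze_winners := by
  intro votes cands _hdom _hpre
  unfold Spec_calculate_schulze_winners
  by_cases hg : votes = [] ∨ cands = []
  · simp only [calculate_schulze_winners, calculate_schulze_winners_alt, if_pos hg]
  · have hcs : cands ≠ [] := fun h => hg (Or.inr h)
    simp only [calculate_schulze_winners, calculate_schulze_winners_alt, if_neg hg]
    rw [dA_eq_foldl_dinc cands votes]
    obtain ⟨hdsh, hdval⟩ := mget_foldl_dinc cands.length (votes.flatMap (pairKeys cands)) _
      (shaped_zero cands.length) (keys_in_range hcs votes)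
    set cnt : PySem.Dict (Nat × Nat) Int := votes.foldl (fun c ranking =>
      (combos2 ranking).foldl (fun c xy =>
        c.insert ((mkIdx cands).getD xy.1 0, (mkIdx cands).getD xy.2 0)
          (c.getD ((mkIdx cands).getD xy.1 0, (mkIdx cands).getD xy.2 0) 0 + 1)) c)
      PySem.Dict.empty with hcntdef
    have hcnt : ∀ k : Nat × Nat, cnt.getD k 0 = ((votes.flatMap (pairKeys cands)).count k : Int) := by
      intro k
      rw [hcntdef]
      have h := cnt_getD_count cands votes k
      simp only [idxv] at h
      exact h
    -- B's edge-weight closure is the count-based weight function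
    have hw : (fun (u v : Nat) =>
        if u ≠ v ∧ cnt.getD (u, v) 0 > cnt.getD (v, u) 0 then cnt.getD (u, v) 0 else 0)
        = wOf cands votes := by
      funext u v
      rw [hcnt (u, v), hcnt (v, u)]
      rfl
    rw [hw]
    -- A's initial strongest-path matrix is the weight matrix of wOf
    obtain ⟨hbsh, hbval⟩ := build_outer cands.length
      (fun i j => i ≠ j ∧ mget ((votes.flatMap (pairKeys cands)).foldl dinc
          (List.replicate cands.length (List.replicate cands.length 0))) i j >
        mget ((votes.flatMap (pairKeys cands)).foldl dinc
          (List.replicate cands.length (List.replicate cands.length 0))) j i)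
      (fun i j => mget ((votes.flatMap (pairKeys cands)).foldl dinc
          (List.replicate cands.length (List.replicate cands.length 0))) i j)
      (List.range cands.length) (List.replicate cands.length (List.replicate cands.length 0))
      List.nodup_range (fun x hx => List.mem_range.mp hx) (shaped_zero cands.length)
    have hp1 : (List.range cands.length).foldl (fun p i => (List.range cands.length).foldl
        (fun p j => if i ≠ j ∧ mget ((votes.flatMap (pairKeys cands)).foldl dinc
              (List.replicate cands.length (List.replicate cands.length 0))) i j >
            mget ((votes.flatMap (pairKeys cands)).foldl dinc
              (List.replicate cands.length (List.replicate cands.length 0))) j i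
          then mset p i j (mget ((votes.flatMap (pairKeys cands)).foldl dinc
              (List.replicate cands.length (List.replicate cands.length 0))) i j) else p) p)
        (List.replicate cands.length (List.replicate cands.length 0))
        = (List.range cands.length).map (fun a => (List.range cands.length).map
            (fun b => wOf cands votes a b)) := by
      apply eq_map_matrix hbsh
      intro a b ha hb
      rw [hbval a b, mget_zero]
      rw [hdval a b ha hb, hdval b a hb ha, mget_zero, mget_zero]
      simp only [List.mem_range, ha, hb, true_and, zero_add]
      rfl
    rw [hp1]
    rw [fw_fold_fun cands.length (List.range cands.length) (wOf cands votes)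
      (fun x hx => List.mem_range.mp hx) (wOf_diag cands votes) (wOf_nonneg cands votes)]
    rw [PySem.List.foldl_append_singleton_eq_map, List.nil_append]
    -- each FW row equals the Bellman-Ford row
    have hrows : (List.range cands.length).map (fun a => (List.range cands.length).map
        (fun b => ((List.range cands.length).foldl fwF (wOf cands votes)) a b))
        = (List.range cands.length).map (bfRow cands.length (wOf cands votes)) := by
      apply List.map_congr_left
      intro s hs
      have hsn := List.mem_range.mp hs
      rw [bfRow_eq]
      apply List.map_congr_left
      intro k hk
      by_cases hks : k = s
      · rw [if_pos hks, hks]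
        exact gsF_diag (wOf cands votes) (wOf_diag cands votes) cands.length s
      · rw [if_neg hks]
        exact fw_eq_bf cands.length (wOf cands votes) (wOf_diag cands votes)
          (wOf_nonneg cands votes) s k (fun h => hks h.symm)
    rw [hrows]
    rw [winners_eq]
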